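-- pv_equiv track=rewrite | github.com/CallumHewitt/adventofcode | 2020/18/solution_1.py | resolve_plus
-- ===== SOURCE A (Python) =====
-- def resolve_plus(equation):
--     new_equation = ''
--     equation_pointer = 0
--     number_buffer = ''
--     plus_lst = []
--     while (equation_pointer < len(equation)):
--         target = equation[equation_pointer]
--         if (target == '+'):
--             plus_lst.append(int(number_buffer))
--             number_buffer = ''
--         elif (target == '*'):
--             plus_lst.append(int(number_buffer))
--             new_equation += str(sum(plus_lst))
--             plus_lst = []
--             new_equation += '*'
--             number_buffer = ''
--         else:
--             number_buffer += target
--         equation_pointer += 1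
--     plus_lst.append(int(number_buffer))
--     new_equation += str(sum(plus_lst))
--     return new_equation
-- ===== SOURCE B (Python) =====
-- def resolve_plus(equation):
--     return '*'.join(
--         str(sum(int(piece) for piece in segment.split('+')))
--         for segment in equation.split('*')
--     )
-- ===== Notes on version B (the rewrite author's own statement) =====
-- stated objective: simpler
-- what changed: Replaced the character-at-a-time pointer/buffer state machine with nested string splitting: split on '*', sum the int() of each '+'-piece per segment, and '*'.join the per-segment sums.
import Mathlib
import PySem

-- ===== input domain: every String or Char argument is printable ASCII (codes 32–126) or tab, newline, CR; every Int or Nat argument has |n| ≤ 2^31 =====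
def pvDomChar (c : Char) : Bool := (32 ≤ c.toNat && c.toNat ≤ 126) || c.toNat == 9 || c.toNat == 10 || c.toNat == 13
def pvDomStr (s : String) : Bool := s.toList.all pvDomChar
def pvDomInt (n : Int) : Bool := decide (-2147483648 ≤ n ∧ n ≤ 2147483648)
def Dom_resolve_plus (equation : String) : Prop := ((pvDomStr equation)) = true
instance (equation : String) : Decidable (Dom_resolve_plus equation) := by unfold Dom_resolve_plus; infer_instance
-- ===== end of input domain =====

-- B replaces A's character-at-a-time pointer/buffer state machine by nested string
-- splitting ('*'-segments, each summed over its '+'-pieces, rejoined with '*'); same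
-- value wherever A returns (Pre_ excludes the inputs where int() raises ValueError).

-- ===== PORT A =====
-- A's while-loop as structural recursion over the characters; `none` models the
-- ValueError that int(number_buffer) raises on a malformed buffer.
def resolvePlusLoop (out : List Char) (buf : List Char) (lst : List Int) :
    List Char → Option (List Char)
  | [] =>
    match PySem.Int.ofChars? buf with
    | none => none
    | some n => some (out ++ PySem.Int.toChars ((lst ++ [n]).sum))
  | c :: rest =>
    if c = '+' then
      match PySem.Int.ofChars? buf with
      | none => none
      | some n => resolvePlusLoop out [] (lst ++ [n]) rest
    else if c = '*' then
      match PySem.Int.ofChars? buf with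
      | none => none
      | some n => resolvePlusLoop (out ++ PySem.Int.toChars ((lst ++ [n]).sum) ++ ['*']) [] [] rest
    else
      resolvePlusLoop out (buf ++ [c]) lst rest

def resolve_plus (equation : String) : String :=
  String.ofList ((resolvePlusLoop [] [] [] equation.toList).getD [])

-- ===== PORT B =====
def resolve_plus_alt (equation : String) : String :=
  match (PySem.Chars.splitOn equation.toList ['*']).mapM (fun segment =>
      ((PySem.Chars.splitOn segment ['+']).mapM PySem.Int.ofChars?).map List.sum) with
  | none => ""   -- a piece on which int() raises ValueError (outside Pre_)
  | some sums => String.ofList (PySem.Chars.join ['*'] (sums.map PySem.Int.toChars))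

-- ===== PRECONDITION & SPEC =====
-- Pre_ excludes exactly the inputs on which A raises ValueError: some '+'-piece of some
-- '*'-segment of the equation is not a Python int literal.
def Pre_resolve_plus (equation : String) : Prop :=
  ∀ seg ∈ PySem.Chars.splitOn equation.toList ['*'],
    ∀ p ∈ PySem.Chars.splitOn seg ['+'], (PySem.Int.ofChars? p).isSome = true
instance (equation : String) : Decidable (Pre_resolve_plus equation) := by
  unfold Pre_resolve_plus; infer_instance
def pvWitness_resolve_plus : String := "1+2*3+4"

def Spec_resolve_plus (equation : String) (out : String) : Prop := out = resolve_plus_alt equation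
instance (equation : String) (out : String) : Decidable (Spec_resolve_plus equation out) := by
  unfold Spec_resolve_plus; infer_instance

-- ===== CLAIM (what is proved, stated in full; the proofs are below) =====
def Claim_equal_resolve_plus : Prop := ∀ (equation : String), Dom_resolve_plus equation → Pre_resolve_plus equation → Spec_resolve_plus equation (resolve_plus equation)

-- ===== LEMMAS AND PROOFS =====

/-- Apply `f` to the head of a list (if any). -/
def mapHead (f : List Char → List Char) : List (List Char) → List (List Char)
  | [] => []
  | p :: ps => f p :: ps

/-- Clean recursive single-character split (reference form of `str.split('<d>')`). -/
def splitOnChar (d : Char) : List Char → List (List Char)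
  | [] => [[]]
  | c :: rest => if c = d then [] :: splitOnChar d rest
                 else mapHead (c :: ·) (splitOnChar d rest)

theorem mapHead_nil_append (l : List (List Char)) : mapHead (fun x => [] ++ x) l = l := by
  cases l <;> simp [mapHead]

theorem mapHead_id (l : List (List Char)) : mapHead (fun x => x) l = l := by
  cases l <;> simp [mapHead]

theorem mapHead_cons (f : List Char → List Char) (p : List Char) (ps : List (List Char)) :
    mapHead f (p :: ps) = f p :: ps := rfl

theorem splitOnChar_exists_cons (d : Char) (cs : List Char) :
    ∃ p ps, splitOnChar d cs = p :: ps := by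
  induction cs with
  | nil => exact ⟨[], [], rfl⟩
  | cons c rest ih =>
    obtain ⟨p, ps, h⟩ := ih
    by_cases hc : c = d
    · exact ⟨[], splitOnChar d rest, by simp [splitOnChar, hc]⟩
    · exact ⟨c :: p, ps, by simp [splitOnChar, hc, h, mapHead]⟩

theorem splitOn_go_single (d : Char) (fuel : Nat) :
    ∀ (l cur : List Char) (acc : List (List Char)), l.length < fuel →
      PySem.Chars.splitOn.go [d] fuel l cur acc
        = acc.reverse ++ mapHead (cur.reverse ++ ·) (splitOnChar d l) := by
  induction fuel with
  | zero => intro l cur acc h; omega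
  | succ fuel ih =>
    intro l cur acc h
    cases l with
    | nil =>
      rw [PySem.Chars.splitOn.go.eq_def]
      simp [splitOnChar, mapHead]
    | cons c rest =>
      rw [PySem.Chars.splitOn.go.eq_def]
      simp only [List.isPrefixOf]
      by_cases hc : c = d
      · subst hc
        rw [if_pos (by simp)]
        rw [List.length_singleton, List.drop_succ_cons, List.drop_zero]
        rw [ih _ [] (cur.reverse :: acc) (by simpa using h)]
        obtain ⟨p, ps, hsp⟩ := splitOnChar_exists_cons c rest
        simp [splitOnChar, mapHead, hsp]
      · rw [if_neg (by simp [Ne.symm hc])]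
        rw [ih rest (c :: cur) acc (by simpa using Nat.lt_of_succ_lt_succ (by simpa using h))]
        obtain ⟨p, ps, hsp⟩ := splitOnChar_exists_cons d rest
        simp [splitOnChar, hc, hsp, mapHead]

theorem splitOn_single (cs : List Char) (d : Char) :
    PySem.Chars.splitOn cs [d] = splitOnChar d cs := by
  unfold PySem.Chars.splitOn
  rw [splitOn_go_single d (cs.length + 1) cs [] [] (by omega)]
  obtain ⟨p, ps, hsp⟩ := splitOnChar_exists_cons d cs
  simp [hsp, mapHead]

/-- Per-segment value of B: sum of the parsed '+'-pieces. -/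
def pieceSum (seg : List Char) : Option Int :=
  ((splitOnChar '+' seg).mapM PySem.Int.ofChars?).map List.sum

/-- Loop invariant: A's state machine, started with pending output `out`, buffer `buf`
and pending addends `lst`, computes B's split-sum-join value of the rest. -/
theorem resolvePlusLoop_eq (cs : List Char) :
    ∀ (out buf : List Char) (lst : List Int),
      resolvePlusLoop out buf lst cs =
        (match splitOnChar '*' cs with
         | [] => none
         | seg :: rest =>
           ((mapHead (buf ++ ·) (splitOnChar '+' seg)).mapM PySem.Int.ofChars?).bind fun ns =>
           (rest.mapM pieceSum).map fun vs =>
           out ++ PySem.Chars.join ['*'] (((lst.sum + ns.sum) :: vs).map PySem.Int.toChars)) := by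
  induction cs with
  | nil =>
    intro out buf lst
    simp only [splitOnChar, mapHead_cons, resolvePlusLoop]
    cases hP : PySem.Int.ofChars? buf with
    | none => simp [List.mapM_cons, hP]
    | some n => simp [List.mapM_cons, hP, PySem.Chars.join_singleton]
  | cons c rest ih =>
    intro out buf lst
    obtain ⟨p, ps, hsp⟩ := splitOnChar_exists_cons '*' rest
    by_cases hplus : c = '+'
    · -- '+' : push the buffer onto plus_lst
      subst hplus
      cases hP : PySem.Int.ofChars? buf with
      | none =>
        obtain ⟨q, qs, hsq⟩ := splitOnChar_exists_cons '+' p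
        simp [resolvePlusLoop, splitOnChar, hsp, mapHead_cons, hsq, List.mapM_cons, hP]
      | some n =>
        have hred : resolvePlusLoop out buf lst ('+' :: rest)
            = resolvePlusLoop out [] (lst ++ [n]) rest := by
          simp [resolvePlusLoop, hP]
        rw [hred, ih out [] (lst ++ [n]), hsp]
        simp only [splitOnChar, mapHead_cons, mapHead_id, mapHead_id, List.nil_append, hsp]
        cases hQ : (splitOnChar '+' p).mapM PySem.Int.ofChars? with
        | none => simp [hQ, hP, splitOnChar, mapHead_cons, List.mapM_cons]
        | some ns =>
          cases hR : ps.mapM pieceSum with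
          | none => simp [hQ, hR, hP, splitOnChar, mapHead_cons, List.mapM_cons]
          | some vs =>
            have harith : lst.sum + n + ns.sum = lst.sum + (n + ns.sum) := by ring
            simp [hQ, hR, hP, splitOnChar, mapHead_cons, List.mapM_cons, harith]
    · by_cases hstar : c = '*'
      · -- '*' : flush sum(plus_lst) and a '*' into the output
        subst hstar
        cases hP : PySem.Int.ofChars? buf with
        | none => simp [resolvePlusLoop, splitOnChar, hsp, mapHead_cons, List.mapM_cons, hP]
        | some n =>
          have hred : resolvePlusLoop out buf lst ('*' :: rest)
              = resolvePlusLoop (out ++ PySem.Int.toChars ((lst ++ [n]).sum) ++ ['*']) [] [] rest := by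
            simp [resolvePlusLoop, hP]
          rw [hred, ih _ [] [], hsp]
          simp only [splitOnChar, mapHead_cons, mapHead_id, mapHead_id, List.nil_append, hsp]
          cases hQ : (splitOnChar '+' p).mapM PySem.Int.ofChars? with
          | none => simp [hP, hQ, pieceSum, splitOnChar, mapHead_cons, List.mapM_cons]
          | some ns =>
            cases hR : ps.mapM pieceSum with
            | none => simp [hP, hQ, hR, pieceSum, splitOnChar, mapHead_cons, List.mapM_cons]
            | some vs =>
              simp [hP, hQ, hR, pieceSum, splitOnChar, mapHead_cons, List.mapM_cons,
                PySem.Chars.join_cons_cons]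
      · -- digit/space/etc. : extend the buffer
        have hred : resolvePlusLoop out buf lst (c :: rest)
            = resolvePlusLoop out (buf ++ [c]) lst rest := by
          simp [resolvePlusLoop, hplus, hstar]
        rw [hred, ih out (buf ++ [c]) lst, hsp]
        obtain ⟨q, qs, hsq⟩ := splitOnChar_exists_cons '+' p
        simp [splitOnChar, hsp, hstar, mapHead_cons, hsq, hplus, List.mapM_cons]

-- ===== VERDICT (by name: the statement is the Claim_ definition above) =====
theorem resolve_plus_spec : Claim_equal_resolve_plus := by
  intro equation _ _
  unfold Spec_resolve_plus resolve_plus resolve_plus_alt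
  rw [resolvePlusLoop_eq]
  simp only [splitOn_single]
  obtain ⟨p, ps, hsp⟩ := splitOnChar_exists_cons '*' equation.toList
  simp only [hsp, mapHead_nil_append, List.mapM_cons]
  rw [show List.mapM pieceSum ps
        = ps.mapM (fun segment =>
            ((splitOnChar '+' segment).mapM PySem.Int.ofChars?).map List.sum) from rfl]
  cases hQ : (splitOnChar '+' p).mapM PySem.Int.ofChars? with
  | none => simp
  | some ns =>
    cases hR : ps.mapM (fun segment =>
        ((splitOnChar '+' segment).mapM PySem.Int.ofChars?).map List.sum) with
    | none => simp
    | some vs => simp
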